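-- pv_equiv track=rewrite | github.com/Shilenkovv/Algorithms_training_6.0_by_Yandex | week02/f_new.py | tripple_mul
-- ===== SOURCE A (Python) =====
-- def tripple_mul(nums):
--     prefixsum = [0] * (len(nums) + 1)
--     for i in range(1, len(nums) + 1):
--         prefixsum[i] = prefixsum[i - 1] + nums[i - 1]
--     idx = 2
--     ans = 0
--     while idx < len(prefixsum) - 1:
--         ans += (
--             prefixsum[idx - 1]
--             * nums[idx - 1]
--             * (prefixsum[-1] - prefixsum[idx])
--         )
--         idx += 1
--     return ans % 1000000007
-- ===== SOURCE B (Python) =====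
-- def tripple_mul(nums):
--     s1 = 0
--     s2 = 0
--     s3 = 0
--     for x in nums:
--         s1 += x
--         s2 += x * x
--         s3 += x * x * x
--     return ((s1 * s1 * s1 - 3 * s1 * s2 + 2 * s3) // 6) % 1000000007
-- ===== Notes on version B (the rewrite author's own statement) =====
-- stated objective: alternative
-- what changed: The sum of prefix*middle*suffix products equals the third elementary symmetric polynomial e3(nums); B computes it in one pass via power sums s1,s2,s3 and Newton's identity e3 = (s1^3 - 3*s1*s2 + 2*s3)/6, with no prefix-sum array and no left/right decomposition.
import Mathlib
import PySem

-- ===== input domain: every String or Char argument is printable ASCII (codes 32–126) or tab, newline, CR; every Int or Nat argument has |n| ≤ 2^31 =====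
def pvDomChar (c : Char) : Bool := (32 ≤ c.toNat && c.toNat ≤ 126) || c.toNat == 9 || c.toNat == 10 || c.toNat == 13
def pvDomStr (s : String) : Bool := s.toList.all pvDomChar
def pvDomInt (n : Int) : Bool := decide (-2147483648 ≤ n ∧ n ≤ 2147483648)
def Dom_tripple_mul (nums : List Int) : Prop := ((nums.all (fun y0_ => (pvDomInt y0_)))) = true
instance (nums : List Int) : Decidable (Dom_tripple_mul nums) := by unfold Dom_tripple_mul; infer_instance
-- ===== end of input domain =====

-- B replaces A's prefix-sum-array scan by Newton's identity: the answer is the third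
-- elementary symmetric polynomial, computed from the power sums s1, s2, s3 in one pass.

-- ===== PORT A =====
def tripple_mul (nums : List Int) : Int :=
  let prefixsum0 : List Int := List.replicate (nums.length + 1) 0
  let prefixsum :=
    (PySem.List.pyRange 1 (PySem.List.len nums + 1) 1).foldl
      (fun ps i =>
        PySem.List.pySetD ps i
          (PySem.List.pyGetD ps (i - 1) 0 + PySem.List.pyGetD nums (i - 1) 0))
      prefixsum0
  let ans :=
    (PySem.List.pyRange 2 (PySem.List.len prefixsum - 1) 1).foldl
      (fun ans idx =>
        ans +
          PySem.List.pyGetD prefixsum (idx - 1) 0 *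
            PySem.List.pyGetD nums (idx - 1) 0 *
            (PySem.List.pyGetD prefixsum (-1) 0 - PySem.List.pyGetD prefixsum idx 0))
      0
  PySem.Int.mod ans 1000000007

-- ===== PORT B =====
def tripple_mul_alt (nums : List Int) : Int :=
  let st := nums.foldl
    (fun (s : Int × Int × Int) x => (s.1 + x, s.2.1 + x * x, s.2.2 + x * x * x))
    (0, 0, 0)
  PySem.Int.mod
    (PySem.Int.floordiv (st.1 * st.1 * st.1 - 3 * st.1 * st.2.1 + 2 * st.2.2) 6)
    1000000007

-- ===== PRECONDITION & SPEC =====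
def Spec_tripple_mul (nums : List Int) (out : Int) : Prop := out = tripple_mul_alt nums
instance (nums : List Int) (out : Int) : Decidable (Spec_tripple_mul nums out) := by unfold Spec_tripple_mul; infer_instance

-- ===== CLAIM (what is proved, stated in full; the proofs are below) =====
def Claim_equal_tripple_mul : Prop := ∀ (nums : List Int), Dom_tripple_mul nums → Spec_tripple_mul nums (tripple_mul nums)

-- ===== LEMMAS AND PROOFS =====

-- sum of the first j elements
def psum (nums : List Int) (j : Nat) : Int := (nums.take j).sum

-- elementary symmetric polynomials e2, e3, recursively
def e2r : List Int → Int
  | [] => 0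
  | x :: xs => x * xs.sum + e2r xs

def e3r : List Int → Int
  | [] => 0
  | x :: xs => x * e2r xs + e3r xs

-- the prefix*middle*suffix sum, recursively with a running left-sum l
def fsumAux : Int → List Int → Int
  | _, [] => 0
  | l, x :: xs => l * x * xs.sum + fsumAux (l + x) xs

theorem psum_succ (nums : List Int) (j : Nat) (h : j < nums.length) :
    psum nums (j + 1) = psum nums j + nums.getD j 0 := by
  unfold psum
  rw [List.take_add_one, List.getElem?_eq_getElem h, List.sum_append]
  rw [List.getD_eq_getElem?_getD, List.getElem?_eq_getElem h]
  simp

theorem psum_len (nums : List Int) : psum nums nums.length = nums.sum := by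
  simp [psum]

-- Newton's identity for e2
theorem e2_id (xs : List Int) :
    2 * e2r xs = xs.sum * xs.sum - (xs.map (fun x => x * x)).sum := by
  induction xs with
  | nil => simp [e2r]
  | cons x xs ih =>
    simp only [e2r, List.sum_cons, List.map_cons]
    linear_combination ih

-- Newton's identity for e3
theorem e3_id (xs : List Int) :
    6 * e3r xs
      = xs.sum * xs.sum * xs.sum
        - 3 * xs.sum * (xs.map (fun x => x * x)).sum
        + 2 * (xs.map (fun x => x * x * x)).sum := by
  induction xs with
  | nil => simp [e3r]
  | cons x xs ih =>
    simp only [e3r, List.sum_cons, List.map_cons]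
    linear_combination ih + 3 * x * e2_id xs

-- the prefix*middle*suffix sum equals e3 (with left offset l)
theorem fsumAux_eq (xs : List Int) : ∀ l : Int, fsumAux l xs = l * e2r xs + e3r xs := by
  induction xs with
  | nil => intro l; simp [fsumAux, e2r, e3r]
  | cons x xs ih =>
    intro l
    simp only [fsumAux, e2r, e3r, ih (l + x)]
    ring

-- fsumAux as an indexed sum over all positions
theorem fsumAux_range (xs : List Int) : ∀ l : Int,
    fsumAux l xs
      = ((List.range xs.length).map
          (fun j => (l + psum xs j) * xs.getD j 0 * (xs.sum - psum xs (j + 1)))).sum := by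
  induction xs with
  | nil => intro l; simp [fsumAux]
  | cons x xs ih =>
    intro l
    rw [List.length_cons, List.range_succ_eq_map]
    simp only [List.map_cons, List.sum_cons, List.map_map]
    have h0 : (l + psum (x :: xs) 0) * (x :: xs).getD 0 0 * (x + xs.sum - psum (x :: xs) (0 + 1))
        = l * x * xs.sum := by
      simp [psum]
    have hterm : ∀ j : Nat,
        (l + psum (x :: xs) (j + 1)) * (x :: xs).getD (j + 1) 0
            * (x + xs.sum - psum (x :: xs) (j + 1 + 1))
        = ((l + x) + psum xs j) * xs.getD j 0 * (xs.sum - psum xs (j + 1)) := by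
      intro j
      have h1 : psum (x :: xs) (j + 1) = x + psum xs j := by simp [psum]
      have h2 : psum (x :: xs) (j + 1 + 1) = x + psum xs (j + 1) := by simp [psum]
      simp only [h1, h2, List.getD_cons_succ]
      ring
    rw [h0]
    simp only [Function.comp_def, Nat.succ_eq_add_one, hterm]
    rw [← ih (l + x)]
    simp only [fsumAux]

-- the j-th middle term as A computes it
def gterm (nums : List Int) (j : Nat) : Int :=
  psum nums j * nums.getD j 0 * (psum nums nums.length - psum nums (j + 1))

-- A's prefix-sum building loop: after processing i = 1..m the array holds psum at 0..m
theorem buildA (nums : List Int) (m : Nat) (hm : m ≤ nums.length) :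
    ((PySem.List.pyRange 1 ((m : Int) + 1) 1).foldl
        (fun ps i =>
          PySem.List.pySetD ps i
            (PySem.List.pyGetD ps (i - 1) 0 + PySem.List.pyGetD nums (i - 1) 0))
        (List.replicate (nums.length + 1) 0)).length = nums.length + 1 ∧
    ∀ i ≤ m,
      ((PySem.List.pyRange 1 ((m : Int) + 1) 1).foldl
        (fun ps i =>
          PySem.List.pySetD ps i
            (PySem.List.pyGetD ps (i - 1) 0 + PySem.List.pyGetD nums (i - 1) 0))
        (List.replicate (nums.length + 1) 0)).getD i 0 = psum nums i := by
  induction m with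
  | zero =>
    constructor
    · simp
    · intro i hi
      interval_cases i
      simp [psum]
  | succ m ih =>
    have hm' : m ≤ nums.length := by omega
    obtain ⟨hlen, hval⟩ := ih hm'
    have hsplit : PySem.List.pyRange 1 (((m + 1 : Nat) : Int) + 1) 1
        = PySem.List.pyRange 1 ((m : Int) + 1) 1 ++ [(m : Int) + 1] := by
      have : (((m + 1 : Nat) : Int) + 1) = ((m : Int) + 1) + 1 := by push_cast; ring
      rw [this, PySem.List.pyRange_one_succ_right (by omega)]
    rw [hsplit, List.foldl_append]
    set B := (PySem.List.pyRange 1 ((m : Int) + 1) 1).foldl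
        (fun ps i =>
          PySem.List.pySetD ps i
            (PySem.List.pyGetD ps (i - 1) 0 + PySem.List.pyGetD nums (i - 1) 0))
        (List.replicate (nums.length + 1) 0) with hB
    simp only [List.foldl_cons, List.foldl_nil]
    have hcast : ((m : Int) + 1) = ((m + 1 : Nat) : Int) := by push_cast; ring
    rw [hcast]
    rw [show ((m + 1 : Nat) : Int) - 1 = ((m : Nat) : Int) by push_cast; ring]
    rw [PySem.List.pySetD_natCast]
    have hv : PySem.List.pyGetD B ((m : Nat) : Int) 0 + PySem.List.pyGetD nums ((m : Nat) : Int) 0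
        = psum nums (m + 1) := by
      rw [PySem.List.pyGetD_natCast, PySem.List.pyGetD_natCast, hval m (le_refl m),
        psum_succ nums m (by omega)]
    rw [hv]
    constructor
    · simp [hlen]
    · intro i hi
      rcases Nat.lt_or_ge i (m + 1) with h | h
      · rw [List.getD, List.getElem?_set_ne (by omega)]
        exact hval i (by omega)
      · have hi' : i = m + 1 := by omega
        subst hi'
        rw [List.getD, List.getElem?_set_self (by omega)]
        simp

-- the first and last positions contribute nothing: the full indexed sum equals the middle one
theorem trim (xs : List Int) :
    ((List.range xs.length).map (gterm xs)).sum
      = ((List.range (xs.length - 2)).map (fun k => gterm xs (k + 1))).sum := by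
  rcases hlen : xs.length with _ | n
  · simp
  · rcases hn : n with _ | m
    · simp [gterm, psum]
    · have h1 : xs.length = m + 2 := by omega
      rw [show m + 1 + 1 - 2 = m by omega,
        List.range_succ, List.map_append, List.sum_append, List.range_succ_eq_map]
      simp only [List.map_cons, List.sum_cons, List.map_map, List.map_nil, List.sum_nil]
      have h0 : gterm xs 0 = 0 := by simp [gterm, psum]
      have hlast : gterm xs (m + 1) = 0 := by
        unfold gterm
        rw [h1]
        ring
      rw [h0, hlast, Function.comp_def]
      simp

-- B's accumulating pass computes the three power sums
theorem foldB (xs : List Int) : ∀ a b c : Int,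
    xs.foldl (fun (s : Int × Int × Int) x => (s.1 + x, s.2.1 + x * x, s.2.2 + x * x * x))
        (a, b, c)
      = (a + xs.sum, b + (xs.map (fun x => x * x)).sum, c + (xs.map (fun x => x * x * x)).sum) := by
  induction xs with
  | nil => intro a b c; simp
  | cons x xs ih =>
    intro a b c
    simp only [List.foldl_cons, List.map_cons, List.sum_cons, ih]
    refine Prod.ext (by ring) (Prod.ext (by ring) (by ring))

-- ===== VERDICT (by name: the statement is the Claim_ definition above) =====
theorem tripple_mul_spec : Claim_equal_tripple_mul := by
  intro nums _
  unfold Spec_tripple_mul tripple_mul tripple_mul_alt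
  simp only [PySem.List.len_eq]
  obtain ⟨hlen, hval⟩ := buildA nums nums.length (le_refl _)
  set ps := (PySem.List.pyRange 1 ((nums.length : Int) + 1) 1).foldl
      (fun ps i => PySem.List.pySetD ps i
        (PySem.List.pyGetD ps (i - 1) 0 + PySem.List.pyGetD nums (i - 1) 0))
      (List.replicate (nums.length + 1) 0) with hps
  have hvalE : ∀ i : Nat, i ≤ nums.length → ∀ h : i < ps.length, ps[i] = psum nums i := by
    intro i hi h
    have := hval i hi
    rwa [List.getD_eq_getElem ps 0 h] at this
  have hlast : PySem.List.pyGetD ps (-1) 0 = psum nums nums.length := by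
    rw [PySem.List.pyGetD_neg_ofNat ps 1 0 (by omega) (by omega)]
    have h1 : ps.length - 1 = nums.length := by omega
    simp only [h1]
    exact hvalE nums.length (le_refl _) (by omega)
  rw [hlen]
  rw [show ((nums.length + 1 : Nat) : Int) - 1 = (nums.length : Int) by push_cast; ring]
  -- A's accumulation loop is the sum of gterm over the middle indices
  have hA : (PySem.List.pyRange 2 (nums.length : Int) 1).foldl
      (fun ans idx => ans + PySem.List.pyGetD ps (idx - 1) 0 *
        PySem.List.pyGetD nums (idx - 1) 0 *
        (PySem.List.pyGetD ps (-1) 0 - PySem.List.pyGetD ps idx 0)) 0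
      = ((List.range (nums.length - 2)).map (fun k => gterm nums (k + 1))).sum := by
    rw [PySem.List.foldl_add]
    rw [zero_add, PySem.List.pyRange_one, List.map_map]
    rw [show ((nums.length : Int) - 2).toNat = nums.length - 2 by omega]
    congr 1
    apply List.map_congr_left
    intro k hk
    have hk' : k < nums.length - 2 := List.mem_range.mp hk
    simp only [Function.comp_def]
    rw [show (2 : Int) + (k : Nat) - 1 = ((k + 1 : Nat) : Int) by push_cast; ring]
    rw [show (2 : Int) + (k : Nat) = ((k + 2 : Nat) : Int) by push_cast; ring]
    rw [PySem.List.pyGetD_natCast, PySem.List.pyGetD_natCast,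
      PySem.List.pyGetD_natCast, hlast]
    rw [hval (k + 1) (by omega), hval (k + 2) (by omega)]
    unfold gterm
    rw [show k + 1 + 1 = k + 2 from rfl]
  rw [hA]
  -- the middle sum is e3
  have hE : ((List.range (nums.length - 2)).map (fun k => gterm nums (k + 1))).sum
      = e3r nums := by
    rw [← trim nums]
    have hr := fsumAux_range nums 0
    have hg : ((List.range nums.length).map
        (fun j => ((0 : Int) + psum nums j) * nums.getD j 0 * (nums.sum - psum nums (j + 1)))).sum
        = ((List.range nums.length).map (gterm nums)).sum := by
      congr 1
      apply List.map_congr_left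
      intro j _
      unfold gterm
      rw [psum_len, zero_add]
    rw [← hg, ← hr, fsumAux_eq, zero_mul, zero_add]
  rw [hE]
  -- B's side: power sums and Newton's identity
  rw [foldB nums 0 0 0]
  simp only [zero_add]
  congr 1
  rw [← e3_id nums, PySem.Int.floordiv_eq_ediv_of_pos (by norm_num),
    Int.mul_ediv_cancel_left _ (by norm_num)]
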